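-- pv_equiv track=rewrite | github.com/boringlee24/keras_old | examples/pwr_run/checkpointing/dash/simulator/opt_dash.py | shortest_jobs_first
-- ===== SOURCE A (Python) =====
-- def shortest_jobs_first(num_GPUs, job_num_GPUs, job_remaining_time):
--     v100_jrt = {}
--     for job in job_remaining_time:
--         v100_jrt[job] = job_remaining_time[job][1]
--     num_V100 = num_GPUs[1]
--     num_jobs = len(job_num_GPUs)
--     sorted_pool = sorted(v100_jrt, key=v100_jrt.get, reverse=False)[:num_V100]
--     jobs = list(job_num_GPUs.keys())
--
--     job_GPU_types = {}
--     for i in range(num_jobs):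
--         job_GPU_types[jobs[i]] = 1 if jobs[i] in sorted_pool else 0
--     return job_GPU_types
-- ===== SOURCE B (Python) =====
-- import heapq
--
-- def shortest_jobs_first(num_GPUs, job_num_GPUs, job_remaining_time):
--     v100_jrt = {job: times[1] for job, times in job_remaining_time.items()}
--     pool = set(heapq.nsmallest(num_GPUs[1], v100_jrt, key=v100_jrt.get))
--     return {job: (1 if job in pool else 0) for job in job_num_GPUs}
-- ===== Notes on version B (the rewrite author's own statement) =====
-- stated objective: faster
-- what changed: Replaces the full sort-then-slice selection of the num_V100 shortest-remaining-time jobs with a heap-based top-k selection (heapq.nsmallest) collected into a set (turning A's per-job linear scan of the pool list into an O(1) set lookup), and builds both dicts with comprehensions instead of index loops.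
-- outside the precondition, e.g. on shortest_jobs_first([0, -1], {'b': 0}, {'a': [0, 7], 'b': [0, 3]}): A returns {'b': 1}, B returns {'b': 0}
import Mathlib
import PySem

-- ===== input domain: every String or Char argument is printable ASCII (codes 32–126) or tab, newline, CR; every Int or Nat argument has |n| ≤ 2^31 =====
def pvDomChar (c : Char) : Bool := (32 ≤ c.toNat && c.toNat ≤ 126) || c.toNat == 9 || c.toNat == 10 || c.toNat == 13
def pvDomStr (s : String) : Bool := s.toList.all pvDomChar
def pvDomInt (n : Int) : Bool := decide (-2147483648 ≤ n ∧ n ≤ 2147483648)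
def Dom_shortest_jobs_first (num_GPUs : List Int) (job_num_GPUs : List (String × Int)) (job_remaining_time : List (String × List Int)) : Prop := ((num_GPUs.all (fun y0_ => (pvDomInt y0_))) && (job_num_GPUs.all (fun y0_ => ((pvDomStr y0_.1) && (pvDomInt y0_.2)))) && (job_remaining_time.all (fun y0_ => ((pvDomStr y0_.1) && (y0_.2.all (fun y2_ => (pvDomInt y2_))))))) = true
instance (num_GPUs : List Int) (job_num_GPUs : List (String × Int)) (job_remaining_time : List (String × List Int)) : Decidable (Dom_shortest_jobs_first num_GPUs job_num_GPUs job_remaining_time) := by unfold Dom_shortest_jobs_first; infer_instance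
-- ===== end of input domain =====

-- B replaces A's full sort + slice of the remaining-time pool with a heap-based top-k
-- selection (heapq.nsmallest) collected into a set, and builds both dicts by
-- comprehensions instead of index loops.
-- Equivalence is about the RETURN value; neither version mutates its arguments.

-- ===== PORT A =====
-- Python dicts arrive as association lists; PySem.Dict.ofList reproduces dict(pairs)
-- (last value wins, first position kept).  key=v100_jrt.get is ported as getD _ 0,
-- exact because every sorted element is a key of v100_jrt.
def shortest_jobs_first (num_GPUs : List Int) (job_num_GPUs : List (String × Int)) (job_remaining_time : List (String × List Int)) : List (String × Int) :=
  let jrtD := PySem.Dict.ofList job_remaining_time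
  -- for job in job_remaining_time: v100_jrt[job] = job_remaining_time[job][1]
  let v100_jrt := jrtD.keys.foldl
    (fun d job => d.insert job (PySem.List.pyGetD (jrtD.getD job []) 1 0)) PySem.Dict.empty
  let num_V100 := PySem.List.pyGetD num_GPUs 1 0
  let gD := PySem.Dict.ofList job_num_GPUs
  let num_jobs := gD.size
  let sorted_pool := PySem.List.slice
    (PySem.List.sorted v100_jrt.keys (fun j => v100_jrt.getD j 0) false) none (some num_V100)
  let jobs := gD.keys
  -- for i in range(num_jobs): job_GPU_types[jobs[i]] = 1 if jobs[i] in sorted_pool else 0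
  let job_GPU_types := (PySem.List.pyRange 0 (num_jobs : Int) 1).foldl
    (fun d i =>
      (fun d job => d.insert job (if sorted_pool.contains job then (1 : Int) else 0))
        d (PySem.List.pyGetD jobs i "")) PySem.Dict.empty
  job_GPU_types.items

-- ===== PORT B =====
-- heapq.nsmallest(n, xs, key) is stable top-k: ported by its library meaning,
-- the first n elements of the stable sort (n ≥ 0 under Pre_).
def shortest_jobs_first_alt (num_GPUs : List Int) (job_num_GPUs : List (String × Int)) (job_remaining_time : List (String × List Int)) : List (String × Int) :=
  let jrtD := PySem.Dict.ofList job_remaining_time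
  -- v100_jrt = {job: times[1] for job, times in job_remaining_time.items()}
  let v100_jrt := PySem.Dict.mk (jrtD.items.map (fun p => (p.1, PySem.List.pyGetD p.2 1 0)))
  -- pool = set(heapq.nsmallest(num_GPUs[1], v100_jrt, key=v100_jrt.get))
  let pool : PySem.Set String := PySem.Set.ofList
    ((PySem.List.sorted v100_jrt.keys (fun j => v100_jrt.getD j 0) false).take
      (PySem.List.pyGetD num_GPUs 1 0).toNat)
  -- return {job: (1 if job in pool else 0) for job in job_num_GPUs}
  (PySem.Dict.mk ((PySem.Dict.ofList job_num_GPUs).keys.map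
    (fun job => (job, if pool.contains job then (1 : Int) else 0)))).items

-- ===== PRECONDITION & SPEC =====
-- Pre_ excludes (a) the crashes: num_GPUs shorter than 2 (IndexError on num_GPUs[1])
-- and a remaining-time value with fewer than 2 entries (IndexError on [1]); and
-- (b) a negative num_GPUs[1] — a GPU count outside the task's natural domain, where
-- A's slice [:negative] accidentally keeps all but the |n| longest jobs while B's
-- top-k selection naturally selects none.
def Pre_shortest_jobs_first (num_GPUs : List Int) (job_num_GPUs : List (String × Int)) (job_remaining_time : List (String × List Int)) : Prop :=
  2 ≤ num_GPUs.length ∧ 0 ≤ num_GPUs.getD 1 0 ∧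
    ∀ p ∈ (PySem.Dict.ofList job_remaining_time).items, 2 ≤ p.2.length
instance (num_GPUs : List Int) (job_num_GPUs : List (String × Int)) (job_remaining_time : List (String × List Int)) : Decidable (Pre_shortest_jobs_first num_GPUs job_num_GPUs job_remaining_time) := by unfold Pre_shortest_jobs_first; infer_instance

def pvWitness_shortest_jobs_first : List Int × (List (String × Int)) × (List (String × List Int)) :=
  ([1, 1], [("a", 1), ("b", 2)], [("a", [3, 4]), ("b", [3, 2])])

def Spec_shortest_jobs_first (num_GPUs : List Int) (job_num_GPUs : List (String × Int)) (job_remaining_time : List (String × List Int)) (out : List (String × Int)) : Prop := out = shortest_jobs_first_alt num_GPUs job_num_GPUs job_remaining_time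
instance (num_GPUs : List Int) (job_num_GPUs : List (String × Int)) (job_remaining_time : List (String × List Int)) (out : List (String × Int)) : Decidable (Spec_shortest_jobs_first num_GPUs job_num_GPUs job_remaining_time out) := by unfold Spec_shortest_jobs_first; infer_instance

-- ===== CLAIM (what is proved, stated in full; the proofs are below) =====
def Claim_equal_shortest_jobs_first : Prop := ∀ (num_GPUs : List Int) (job_num_GPUs : List (String × Int)) (job_remaining_time : List (String × List Int)), Dom_shortest_jobs_first num_GPUs job_num_GPUs job_remaining_time → Pre_shortest_jobs_first num_GPUs job_num_GPUs job_remaining_time → Spec_shortest_jobs_first num_GPUs job_num_GPUs job_remaining_time (shortest_jobs_first num_GPUs job_num_GPUs job_remaining_time)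

-- ===== LEMMAS AND PROOFS =====

-- A's v100_jrt-building loop and B's dict comprehension produce the same dict.
theorem v100_jrt_eq (jrt : List (String × List Int)) :
    (List.foldl (fun d job => d.insert job
        (PySem.List.pyGetD ((PySem.Dict.ofList jrt).getD job []) 1 0))
      PySem.Dict.empty (PySem.Dict.ofList jrt).keys)
    = PySem.Dict.mk ((PySem.Dict.ofList jrt).items.map
        (fun p => (p.1, PySem.List.pyGetD p.2 1 0))) := by
  apply PySem.Dict.ext
  rw [PySem.Dict.items_foldl_insert_fresh (PySem.Dict.ofList jrt).keys (fun a => a)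
        (fun job => PySem.List.pyGetD ((PySem.Dict.ofList jrt).getD job []) 1 0)
        PySem.Dict.empty
        (fun a _ => PySem.Dict.contains_empty a)
        (by simp [PySem.Dict.nodup_keys_ofList jrt])]
  rw [PySem.Dict.items_eq_map_keys (PySem.Dict.ofList jrt)
        (PySem.Dict.nodup_keys_ofList jrt) []]
  simp [List.map_map, Function.comp_def, PySem.Dict.empty]

-- A's index-driven labeling loop over range(num_jobs) is the comprehension's map.
theorem label_loop_eq (gD : PySem.Dict String Int) (hnd : gD.keys.Nodup)
    (f : String → Int) :
    ((PySem.List.pyRange 0 (gD.size : Int) 1).foldl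
      (fun d i => d.insert (PySem.List.pyGetD gD.keys i "")
        (f (PySem.List.pyGetD gD.keys i ""))) PySem.Dict.empty).items
    = gD.keys.map (fun job => (job, f job)) := by
  have hsz : (gD.size : Int) = (gD.keys.length : Int) := by
    simp [PySem.Dict.size, PySem.Dict.keys]
  rw [hsz]
  rw [PySem.List.foldl_pyRange_zero_pyGetD' gD.keys ""
        (fun d job => d.insert job (f job)) PySem.Dict.empty]
  rw [PySem.Dict.items_foldl_insert_fresh gD.keys (fun a => a) (fun job => f job)
        PySem.Dict.empty (fun a _ => PySem.Dict.contains_empty a)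
        (by simpa using hnd)]
  simp [PySem.Dict.empty]

-- Python's `x in set(l)` agrees with `x in l`.
theorem contains_ofList (l : List String) (j : String) :
    (PySem.Set.ofList l).contains j = l.contains j := by
  rw [Bool.eq_iff_iff]
  simp [PySem.Set.mem_ofList]

-- ===== VERDICT (by name: the statement is the Claim_ definition above) =====
theorem shortest_jobs_first_spec : Claim_equal_shortest_jobs_first := by
  intro num_GPUs job_num_GPUs job_remaining_time _ hpre
  obtain ⟨hlen, hpos, -⟩ := hpre
  unfold Spec_shortest_jobs_first shortest_jobs_first shortest_jobs_first_alt
  dsimp only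
  rw [v100_jrt_eq]
  have hnn : 0 ≤ PySem.List.pyGetD num_GPUs 1 0 := by
    rw [PySem.List.pyGetD_ofNat' num_GPUs 1 0]; exact hpos
  rw [PySem.List.slice_to _ hnn]
  simp only [contains_ofList]
  set v := PySem.Dict.mk ((PySem.Dict.ofList job_remaining_time).items.map
    (fun p => (p.1, PySem.List.pyGetD p.2 1 0))) with hv
  set P := List.take (PySem.List.pyGetD num_GPUs 1 0).toNat
    (PySem.List.sorted v.keys (fun j => v.getD j 0)) with hP
  rw [label_loop_eq (PySem.Dict.ofList job_num_GPUs)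
        (PySem.Dict.nodup_keys_ofList job_num_GPUs)
        (fun job => if P.contains job = true then (1 : Int) else 0)]
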